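-- pv_equiv track=rewrite | github.com/2made1ra/ARGUS | backend/app/features/assistant/domain/slot_extraction.py | _priority_context
-- ===== SOURCE A (Python) =====
-- def _priority_context(lower: str, position: int) -> str:
--     if position < 0:
--         return lower
--     starts = [lower.rfind(separator, 0, position) for separator in (",", ";", ".")]
--     start = max(starts)
--     ends = [
--         next_position
--         for separator in (",", ";", ".")
--         if (next_position := lower.find(separator, position)) >= 0
--     ]
--     end = min(ends) if ends else len(lower)
--     return lower[start + 1 : end]
-- ===== SOURCE B (Python) =====
-- _SEPS = {",", ";", "."}
--
-- def _priority_context(lower: str, position: int) -> str: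
--     if position < 0:
--         return lower
--     n = len(lower)
--     start = -1
--     i = min(position, n) - 1
--     while i >= 0:
--         if lower[i] in _SEPS:
--             start = i
--             break
--         i -= 1
--     end = n
--     j = position
--     while j < n:
--         if lower[j] in _SEPS:
--             end = j
--             break
--         j += 1
--     return lower[start + 1 : end]
-- ===== Notes on version B (the rewrite author's own statement) =====
-- stated objective: alternative
-- what changed: Replaces the three-rfind/max and three-find/min library-call idiom with two explicit directional scans over the characters: backward from min(position, len)-1 for the start boundary, forward from position for the end boundary.
import Mathlib
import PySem

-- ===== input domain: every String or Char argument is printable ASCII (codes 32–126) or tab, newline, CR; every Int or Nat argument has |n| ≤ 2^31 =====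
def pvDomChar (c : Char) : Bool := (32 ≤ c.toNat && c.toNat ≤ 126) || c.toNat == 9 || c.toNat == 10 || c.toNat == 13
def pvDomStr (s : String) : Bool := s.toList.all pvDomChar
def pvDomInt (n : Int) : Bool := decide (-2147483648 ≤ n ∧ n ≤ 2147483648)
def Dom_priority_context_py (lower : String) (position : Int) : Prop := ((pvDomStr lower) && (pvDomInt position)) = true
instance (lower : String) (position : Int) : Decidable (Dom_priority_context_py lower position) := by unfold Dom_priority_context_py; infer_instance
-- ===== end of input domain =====

-- B replaces A's three-rfind/max and three-find/min library idiom by two explicit directional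
-- scans over the characters (objective: alternative decomposition, same asymptotic cost).

-- ===== PORT A =====
def priority_context_py (lower : String) (position : Int) : String :=
  if position < 0 then lower
  else
    let starts : List Int :=
      [",", ";", "."].map (fun sep => PySem.Str.rfindFrom lower sep 0 (some position))
    let start : Int := (PySem.List.max? starts (fun x => x)).getD (-1)
    let ends : List Int :=
      ([",", ";", "."].map (fun sep => PySem.Str.findFrom lower sep position none)).filter
        (fun np => decide (0 ≤ np))
    let endv : Int :=
      match PySem.List.min? ends (fun x => x) with
      | some m => m
      | none => PySem.Str.len lower
    PySem.Str.slice lower (some (start + 1)) (some endv)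

-- ===== PORT B =====
def pvIsSep (c : Char) : Bool := c == ',' || c == ';' || c == '.'

-- backward while-loop of Source B: the argument is (last index to look at) + 1, counting down
def pvFindLastSep (cs : List Char) : Nat → Int
  | 0 => -1
  | i + 1 => if pvIsSep (cs.getD i ' ') then ((i : Nat) : Int) else pvFindLastSep cs i

-- forward while-loop of Source B: j walks up until a separator or the end of the string
def pvFindFirstSep (cs : List Char) (j : Nat) : Int :=
  if h : j < cs.length then
    if pvIsSep cs[j] then (j : Int) else pvFindFirstSep cs (j + 1)
  else (cs.length : Int)
termination_by cs.length - j

def priority_context_py_alt (lower : String) (position : Int) : String :=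
  if position < 0 then lower
  else
    let cs := lower.toList
    let start : Int := pvFindLastSep cs (min position (cs.length : Int)).toNat
    let endv : Int := pvFindFirstSep cs position.toNat
    PySem.Str.slice lower (some (start + 1)) (some endv)

-- ===== PRECONDITION & SPEC =====
def Spec_priority_context_py (lower : String) (position : Int) (out : String) : Prop := out = priority_context_py_alt lower position
instance (lower : String) (position : Int) (out : String) : Decidable (Spec_priority_context_py lower position out) := by unfold Spec_priority_context_py; infer_instance

-- ===== CLAIM (what is proved, stated in full; the proofs are below) =====
def Claim_equal_priority_context_py : Prop := ∀ (lower : String) (position : Int), Dom_priority_context_py lower position → Spec_priority_context_py lower position (priority_context_py lower position)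

-- ===== LEMMAS AND PROOFS =====

theorem pv_if_self (r : Int) : (if r = -1 then (-1 : Int) else r) = r := by
  split <;> omega

theorem pv_max3 (a b c : Int) :
    (PySem.List.max? [a, b, c] (fun x => x)).getD (-1) = max a (max b c) := by
  rw [PySem.List.max?_id_cons]
  simp only [List.foldl, Option.getD_some]
  exact max_assoc a b c

theorem pv_rgo_zero (s sub : List Char) :
    PySem.Chars.rfind.go s sub 0 = if sub.isPrefixOf s then 0 else -1 := rfl

theorem pv_rgo_succ (s sub : List Char) (j : Nat) :
    PySem.Chars.rfind.go s sub (j + 1)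
      = if sub.isPrefixOf (s.drop (j + 1)) then ((j : Int) + 1) else PySem.Chars.rfind.go s sub j := rfl

theorem pv_rgo_le (ds sub : List Char) : ∀ j : Nat, PySem.Chars.rfind.go ds sub j ≤ (j : Int) := by
  intro j
  induction j with
  | zero => rw [pv_rgo_zero]; split <;> omega
  | succ j ih => rw [pv_rgo_succ]; split <;> omega

theorem pv_rfind_le (ds : List Char) (sub : List Char) :
    PySem.Chars.rfind ds sub ≤ (ds.length : Int) := pv_rgo_le ds sub ds.length

theorem pv_rfind_nil (c : Char) : PySem.Chars.rfind [] [c] = -1 := by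
  show PySem.Chars.rfind.go [] [c] 0 = -1
  rw [pv_rgo_zero]
  simp [List.isPrefixOf]

theorem pv_prefix_single_append (c x : Char) (ys : List Char) (h : ys ≠ []) :
    [c].isPrefixOf (ys ++ [x]) = [c].isPrefixOf ys := by
  cases ys with
  | nil => exact absurd rfl h
  | cons y t => simp [List.isPrefixOf]

theorem pv_rgo_append (ds : List Char) (x c : Char) :
    ∀ j : Nat, j < ds.length →
      PySem.Chars.rfind.go (ds ++ [x]) [c] j = PySem.Chars.rfind.go ds [c] j := by
  intro j
  induction j with
  | zero =>
    intro h
    have hne : ds ≠ [] := by intro h0; simp [h0] at h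
    rw [pv_rgo_zero, pv_rgo_zero, pv_prefix_single_append c x ds hne]
  | succ j ih =>
    intro h
    rw [pv_rgo_succ, pv_rgo_succ, List.drop_append_of_le_length (by omega),
        pv_prefix_single_append c x _ (by simp; omega), ih (by omega)]

theorem pv_rfind_append_single (ds : List Char) (x c : Char) :
    PySem.Chars.rfind (ds ++ [x]) [c]
      = if c = x then (ds.length : Int) else PySem.Chars.rfind ds [c] := by
  have hL : (ds ++ [x]).length = ds.length + 1 := by simp
  show PySem.Chars.rfind.go (ds ++ [x]) [c] ((ds ++ [x]).length) = _
  rw [hL, pv_rgo_succ, List.drop_eq_nil_of_le (by simp),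
      if_neg (by simp [List.isPrefixOf])]
  cases ds with
  | nil =>
    simp only [List.length_nil]
    rw [pv_rgo_zero, pv_rfind_nil]
    by_cases h : c = x <;> simp [h, List.isPrefixOf]
  | cons d t =>
    rw [show (d :: t).length = t.length + 1 from rfl, pv_rgo_succ]
    have hdrop1 : (d :: t ++ [x]).drop (t.length + 1) = [x] := by
      rw [List.drop_append_of_le_length (by simp)]
      simp
    rw [hdrop1, pv_rgo_append (d :: t) x c t.length (by simp)]
    have hr : PySem.Chars.rfind (d :: t) [c] = PySem.Chars.rfind.go (d :: t) [c] t.length := by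
      show PySem.Chars.rfind.go (d :: t) [c] (t.length + 1) = _
      rw [pv_rgo_succ, List.drop_eq_nil_of_le (by simp), if_neg (by simp [List.isPrefixOf])]
    rw [hr]
    have hpre : ([c].isPrefixOf [x]) = (c == x) := by simp [List.isPrefixOf]
    rw [hpre]
    by_cases h : c = x
    · subst h; simp
    · simp [h]

-- the backward scan equals the max of the three one-char rfinds on the clamped prefix
theorem pv_back (cs : List Char) : ∀ m : Nat, m ≤ cs.length →
    max (PySem.Chars.rfind (cs.take m) [','])
      (max (PySem.Chars.rfind (cs.take m) [';']) (PySem.Chars.rfind (cs.take m) ['.']))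
      = pvFindLastSep cs m := by
  intro m
  induction m with
  | zero => intro _; simp [pvFindLastSep, pv_rfind_nil]
  | succ m ih =>
    intro h
    have hm : m < cs.length := by omega
    have htake : cs.take (m + 1) = cs.take m ++ [cs[m]] := by
      rw [List.take_succ]
      simp [List.getElem?_eq_getElem hm]
    have hlen : (cs.take m).length = m := by simp; omega
    have h1 := pv_rfind_append_single (cs.take m) cs[m] ','
    have h2 := pv_rfind_append_single (cs.take m) cs[m] ';'
    have h3 := pv_rfind_append_single (cs.take m) cs[m] '.'
    rw [hlen] at h1 h2 h3
    have hgd : cs.getD m ' ' = cs[m] := List.getD_eq_getElem cs ' ' hm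
    have hb1 := pv_rfind_le (cs.take m) [',']
    have hb2 := pv_rfind_le (cs.take m) [';']
    have hb3 := pv_rfind_le (cs.take m) ['.']
    rw [hlen] at hb1 hb2 hb3
    rw [htake, h1, h2, h3,
        show pvFindLastSep cs (m + 1)
          = if pvIsSep (cs.getD m ' ') then ((m : Nat) : Int) else pvFindLastSep cs m from rfl,
        hgd]
    by_cases hsep : pvIsSep cs[m] = true
    · rw [if_pos hsep]
      have hs2 := hsep
      simp only [pvIsSep, Bool.or_eq_true, beq_iff_eq] at hs2
      rcases hs2 with (hc | hc) | hc
      · rw [if_pos hc.symm, if_neg (by rw [hc]; decide), if_neg (by rw [hc]; decide),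
            max_eq_left (max_le hb2 hb3)]
      · rw [if_neg (by rw [hc]; decide), if_pos hc.symm, if_neg (by rw [hc]; decide),
            max_eq_left hb3, max_eq_right hb1]
      · rw [if_neg (by rw [hc]; decide), if_neg (by rw [hc]; decide), if_pos hc.symm,
            max_eq_right hb2, max_eq_right hb1]
    · rw [if_neg hsep]
      have n1 : ¬((',' : Char) = cs[m]) := fun hh => hsep (by rw [← hh]; decide)
      have n2 : ¬((';' : Char) = cs[m]) := fun hh => hsep (by rw [← hh]; decide)
      have n3 : ¬(('.' : Char) = cs[m]) := fun hh => hsep (by rw [← hh]; decide)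
      rw [if_neg n1, if_neg n2, if_neg n3, ih (by omega)]

theorem pv_fgo_nil (sub : List Char) (k : Nat) :
    PySem.Chars.find.go sub [] k = if sub.isEmpty then (k : Int) else -1 := rfl

theorem pv_fgo_cons (sub : List Char) (x : Char) (t : List Char) (k : Nat) :
    PySem.Chars.find.go sub (x :: t) k
      = if sub.isPrefixOf (x :: t) then (k : Int) else PySem.Chars.find.go sub t (k + 1) := rfl

-- find.go on a one-char needle: shifting the counter
theorem pv_fgo_shift (c : Char) (t : List Char) : ∀ k : Nat,
    PySem.Chars.find.go [c] t (k + 1)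
      = (if PySem.Chars.find.go [c] t k = -1 then -1 else PySem.Chars.find.go [c] t k + 1) := by
  induction t with
  | nil => intro k; rw [pv_fgo_nil, pv_fgo_nil]; simp
  | cons x t ih =>
    intro k
    rw [pv_fgo_cons, pv_fgo_cons]
    by_cases hp : [c].isPrefixOf (x :: t) = true
    · rw [if_pos hp, if_pos hp, if_neg (by omega)]
      push_cast
      ring
    · rw [if_neg hp, if_neg hp, ih (k + 1), ih k]

theorem pv_find_cons (c x : Char) (t : List Char) :
    PySem.Chars.find (x :: t) [c]
      = if c = x then 0
        else (if PySem.Chars.find t [c] = -1 then -1 else PySem.Chars.find t [c] + 1) := by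
  show PySem.Chars.find.go [c] (x :: t) 0 = _
  rw [pv_fgo_cons, pv_fgo_shift c t 0]
  have hpre : ([c].isPrefixOf (x :: t)) = (c == x) := by simp [List.isPrefixOf]
  rw [hpre]
  by_cases h : c = x <;> simp [h, PySem.Chars.find]

theorem pv_find_nil (c : Char) : PySem.Chars.find [] [c] = -1 := by
  show PySem.Chars.find.go [c] [] 0 = -1
  rw [pv_fgo_nil]
  simp

-- proof-only helpers for the forward direction
def pvFirstLen : List Char → Int
  | [] => 0
  | x :: t => if pvIsSep x then 0 else pvFirstLen t + 1

def pvEndExpr (ds : List Char) (p q : Int) : Int :=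
  match PySem.List.min?
      (([',', ';', '.'].map
          (fun c => if PySem.Chars.find ds [c] = -1 then (-1 : Int) else p + PySem.Chars.find ds [c])).filter
        (fun x => decide (0 ≤ x)))
      (fun x => x) with
  | some m => m
  | none => q

theorem pv_shift_term (f p : Int) (hf : -1 ≤ f) :
    (if (if f = -1 then (-1 : Int) else f + 1) = -1 then (-1 : Int)
      else p + (if f = -1 then (-1 : Int) else f + 1))
    = (if f = -1 then (-1 : Int) else (p + 1) + f) := by
  split_ifs <;> omega

theorem pv_shift_cases (f p : Int) (hf : -1 ≤ f) :
    (if f = -1 then (-1 : Int) else (p + 1) + f) = -1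
      ∨ p ≤ (if f = -1 then (-1 : Int) else (p + 1) + f) := by
  split_ifs with h
  · left; rfl
  · right; omega

theorem pv_min_eval (l : List Int) (p q : Int) (hp : 0 ≤ p) (hmem : p ∈ l)
    (hall : ∀ x ∈ l, x = -1 ∨ p ≤ x) :
    (match PySem.List.min? (l.filter (fun x => decide (0 ≤ x))) (fun x => x) with
      | some m => m
      | none => q) = p := by
  have hfm : p ∈ l.filter (fun x => decide (0 ≤ x)) := List.mem_filter.mpr ⟨hmem, by simpa using hp⟩
  cases hmin : PySem.List.min? (l.filter (fun x => decide (0 ≤ x))) (fun x => x) with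
  | none =>
    rw [PySem.List.min?_eq_none_iff] at hmin
    rw [hmin] at hfm
    simp at hfm
  | some m =>
    have hm_mem := PySem.List.min?_mem hmin
    have hge : (0 : Int) ≤ m := by
      have := (List.mem_filter.mp hm_mem).2
      simpa using this
    have hml : m ∈ l := (List.mem_filter.mp hm_mem).1
    have h1 : m ≤ p := PySem.List.min?_id_le hmin p hfm
    have h2 := hall m hml
    show m = p
    rcases h2 with h2 | h2 <;> omega

theorem pv_fwd (ds : List Char) : ∀ p : Int, 0 ≤ p →
    pvEndExpr ds p (p + ds.length) = p + pvFirstLen ds := by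
  induction ds with
  | nil =>
    intro p hp
    simp [pvEndExpr, pv_find_nil, PySem.List.min?, pvFirstLen]
  | cons x t ih =>
    intro p hp
    have hne1 : -1 ≤ PySem.Chars.find t [','] := PySem.Chars.neg_one_le_find t [',']
    have hne2 : -1 ≤ PySem.Chars.find t [';'] := PySem.Chars.neg_one_le_find t [';']
    have hne3 : -1 ≤ PySem.Chars.find t ['.'] := PySem.Chars.neg_one_le_find t ['.']
    by_cases hsx : pvIsSep x = true
    · have hs2 := hsx
      simp only [pvIsSep, Bool.or_eq_true, beq_iff_eq] at hs2
      rcases hs2 with (rfl | rfl) | rfl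
      · rw [show pvFirstLen (',' :: t) = 0 from by simp [pvFirstLen, pvIsSep], add_zero]
        simp only [pvEndExpr, List.map]
        rw [pv_find_cons ',' ',' t, pv_find_cons ';' ',' t, pv_find_cons '.' ',' t,
            if_pos rfl, if_neg (show ¬((';' : Char) = ',') by decide),
            if_neg (show ¬(('.' : Char) = ',') by decide),
            if_neg (show ¬((0 : Int) = -1) by decide), add_zero,
            pv_shift_term _ p hne2, pv_shift_term _ p hne3]
        refine pv_min_eval _ p _ hp (by simp) ?_
        intro y hy
        simp only [List.mem_cons, List.not_mem_nil, or_false] at hy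
        rcases hy with rfl | rfl | rfl
        · right; omega
        · exact pv_shift_cases _ p hne2
        · exact pv_shift_cases _ p hne3
      · rw [show pvFirstLen (';' :: t) = 0 from by simp [pvFirstLen, pvIsSep], add_zero]
        simp only [pvEndExpr, List.map]
        rw [pv_find_cons ',' ';' t, pv_find_cons ';' ';' t, pv_find_cons '.' ';' t,
            if_neg (show ¬((',' : Char) = ';') by decide), if_pos rfl,
            if_neg (show ¬(('.' : Char) = ';') by decide),
            if_neg (show ¬((0 : Int) = -1) by decide), add_zero,
            pv_shift_term _ p hne1, pv_shift_term _ p hne3]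
        refine pv_min_eval _ p _ hp (by simp) ?_
        intro y hy
        simp only [List.mem_cons, List.not_mem_nil, or_false] at hy
        rcases hy with rfl | rfl | rfl
        · exact pv_shift_cases _ p hne1
        · right; omega
        · exact pv_shift_cases _ p hne3
      · rw [show pvFirstLen ('.' :: t) = 0 from by simp [pvFirstLen, pvIsSep], add_zero]
        simp only [pvEndExpr, List.map]
        rw [pv_find_cons ',' '.' t, pv_find_cons ';' '.' t, pv_find_cons '.' '.' t,
            if_neg (show ¬((',' : Char) = '.') by decide),
            if_neg (show ¬((';' : Char) = '.') by decide), if_pos rfl,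
            if_neg (show ¬((0 : Int) = -1) by decide), add_zero,
            pv_shift_term _ p hne1, pv_shift_term _ p hne2]
        refine pv_min_eval _ p _ hp (by simp) ?_
        intro y hy
        simp only [List.mem_cons, List.not_mem_nil, or_false] at hy
        rcases hy with rfl | rfl | rfl
        · exact pv_shift_cases _ p hne1
        · exact pv_shift_cases _ p hne2
        · right; omega
    · have hfl : pvFirstLen (x :: t) = pvFirstLen t + 1 := by simp [pvFirstLen, hsx]
      have n1 : ¬((',' : Char) = x) := fun hh => hsx (by rw [← hh]; decide)
      have n2 : ¬((';' : Char) = x) := fun hh => hsx (by rw [← hh]; decide)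
      have n3 : ¬(('.' : Char) = x) := fun hh => hsx (by rw [← hh]; decide)
      have hq : p + (((x :: t).length) : Int) = (p + 1) + (t.length : Int) := by
        push_cast [List.length_cons]
        ring
      have key : pvEndExpr (x :: t) p (p + ((x :: t).length : Int))
          = pvEndExpr t (p + 1) ((p + 1) + (t.length : Int)) := by
        simp only [pvEndExpr, List.map]
        rw [pv_find_cons ',' x t, pv_find_cons ';' x t, pv_find_cons '.' x t,
            if_neg n1, if_neg n2, if_neg n3,
            pv_shift_term _ p hne1, pv_shift_term _ p hne2, pv_shift_term _ p hne3, hq]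
      rw [key, ih (p + 1) (by omega), hfl]
      ring

theorem pv_firstSep_eq (cs : List Char) : ∀ j : Nat, j ≤ cs.length →
    pvFindFirstSep cs j = j + pvFirstLen (cs.drop j) := by
  intro j hj
  induction hn : cs.length - j generalizing j with
  | zero =>
    have hj' : j = cs.length := by omega
    subst hj'
    rw [pvFindFirstSep]
    simp [pvFirstLen]
  | succ k ih =>
    have hjl : j < cs.length := by omega
    have hdrop : cs.drop j = cs[j] :: cs.drop (j + 1) := List.drop_eq_getElem_cons hjl
    rw [pvFindFirstSep, dif_pos hjl, hdrop]
    by_cases hs : pvIsSep cs[j] = true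
    · simp [hs, pvFirstLen]
    · simp only [Bool.not_eq_true] at hs
      rw [if_neg (by simp [hs]), ih (j + 1) (by omega) (by omega)]
      simp [pvFirstLen, hs]
      omega

theorem pv_findFrom_gt (cs sub : List Char) (p : Int) (h : (cs.length : Int) < p) :
    PySem.Chars.findFrom cs sub p none = -1 := by
  have h0 : ¬ p < 0 := by
    have : (0 : Int) ≤ cs.length := Int.natCast_nonneg _
    omega
  simp [PySem.Chars.findFrom, h0, h]

theorem pv_findFrom_eval (s sub : List Char) (p : Int) (hp : 0 ≤ p)
    (hle : p ≤ (s.length : Int)) :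
    PySem.Chars.findFrom s sub p none
      = if PySem.Chars.find (s.drop p.toNat) sub = -1 then -1
        else p + PySem.Chars.find (s.drop p.toNat) sub := by
  have hcast : p = ((p.toNat : Nat) : Int) := by omega
  conv_lhs => rw [hcast]
  rw [PySem.Chars.findFrom_natCast s sub p.toNat (by omega), ← hcast]

theorem pv_rfindFrom_eval (s sub : List Char) (p : Int) (hp : 0 ≤ p) :
    PySem.Chars.rfindFrom s sub 0 (some p)
      = PySem.Chars.rfind (s.take (min p (s.length : Int)).toNat) sub := by
  have h0 : ¬ ((0 : Int) < 0) := by omega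
  have hpn : ¬ p < 0 := by omega
  by_cases h1 : (s.length : Int) < p
  · have hm : (min p (s.length : Int)).toNat = s.length := by omega
    have hnn : ¬ ((s.length : Int) < 0) := by
      have : (0 : Int) ≤ s.length := Int.natCast_nonneg _
      omega
    simp [PySem.Chars.rfindFrom, h1, h0, hpn, hnn, hm, pv_if_self]
  · have hm : (min p (s.length : Int)).toNat = p.toNat := by omega
    simp [PySem.Chars.rfindFrom, h1, h0, hpn, hm, pv_if_self]

-- ===== VERDICT (by name: the statement is the Claim_ definition above) =====
theorem priority_context_py_spec : Claim_equal_priority_context_py := by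
  intro lower position _dom
  unfold Spec_priority_context_py priority_context_py priority_context_py_alt
  by_cases hneg : position < 0
  · rw [if_pos hneg, if_pos hneg]
  · rw [if_neg hneg, if_neg hneg]
    have hp : 0 ≤ position := by omega
    have hstart :
        ((PySem.List.max?
            ([",", ";", "."].map (fun sep => PySem.Str.rfindFrom lower sep 0 (some position)))
            (fun x => x)).getD (-1))
          = pvFindLastSep lower.toList (min position (lower.toList.length : Int)).toNat := by
      simp only [List.map, PySem.Str.rfindFrom_eq]
      rw [show ("," : String).toList = [','] from rfl,
          show (";" : String).toList = [';'] from rfl,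
          show ("." : String).toList = ['.'] from rfl,
          pv_rfindFrom_eval lower.toList [','] position hp,
          pv_rfindFrom_eval lower.toList [';'] position hp,
          pv_rfindFrom_eval lower.toList ['.'] position hp,
          pv_max3]
      exact pv_back lower.toList _ (by omega)
    have hend :
        (match PySem.List.min?
            (([",", ";", "."].map (fun sep => PySem.Str.findFrom lower sep position none)).filter
              (fun np => decide (0 ≤ np)))
            (fun x => x) with
          | some m => m
          | none => PySem.Str.len lower)
          = pvFindFirstSep lower.toList position.toNat := by
      simp only [List.map, PySem.Str.findFrom_eq]
      rw [show ("," : String).toList = [','] from rfl,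
          show (";" : String).toList = [';'] from rfl,
          show ("." : String).toList = ['.'] from rfl]
      by_cases hbig : (lower.toList.length : Int) < position
      · rw [pv_findFrom_gt _ _ _ hbig, pv_findFrom_gt _ _ _ hbig, pv_findFrom_gt _ _ _ hbig]
        have hB : pvFindFirstSep lower.toList position.toNat = ((lower.toList.length : Nat) : Int) := by
          rw [pvFindFirstSep, dif_neg (by omega)]
        rw [hB]
        simp [List.filter, PySem.List.min?, PySem.Str.len, PySem.Chars.len]
      · have hle : position ≤ (lower.toList.length : Int) := by omega
        rw [pv_findFrom_eval _ _ _ hp hle, pv_findFrom_eval _ _ _ hp hle,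
            pv_findFrom_eval _ _ _ hp hle]
        have hq : PySem.Str.len lower
            = position + (((lower.toList.drop position.toNat).length) : Int) := by
          simp only [PySem.Str.len, PySem.Chars.len, List.length_drop]
          omega
        rw [hq]
        have hmain := pv_fwd (lower.toList.drop position.toNat) position hp
        simp only [pvEndExpr, List.map] at hmain
        rw [hmain, pv_firstSep_eq lower.toList position.toNat (by omega),
            show ((position.toNat : Nat) : Int) = position from by omega]
    show PySem.Str.slice lower
        (some (((PySem.List.max?
            ([",", ";", "."].map (fun sep => PySem.Str.rfindFrom lower sep 0 (some position)))
            (fun x => x)).getD (-1)) + 1))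
        (some (match PySem.List.min?
            (([",", ";", "."].map (fun sep => PySem.Str.findFrom lower sep position none)).filter
              (fun np => decide (0 ≤ np)))
            (fun x => x) with
          | some m => m
          | none => PySem.Str.len lower))
      = PySem.Str.slice lower
        (some (pvFindLastSep lower.toList (min position (lower.toList.length : Int)).toNat + 1))
        (some (pvFindFirstSep lower.toList position.toNat))
    rw [hstart, hend]
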